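-- pv_equiv track=rewrite | github.com/jriberg/awesome-jellyfin | scripts/build_plugin_manifest.py | compare_numeric_tuples
-- ===== SOURCE A (Python) =====
-- def compare_numeric_tuples(a: tuple[int, ...], b: tuple[int, ...]) -> int:
--     max_len = max(len(a), len(b))
--     for idx in range(max_len):
--         av = a[idx] if idx < len(a) else 0
--         bv = b[idx] if idx < len(b) else 0
--         if av > bv:
--             return 1
--         if av < bv:
--             return -1
--     return 0
-- ===== SOURCE B (Python) =====
-- def compare_numeric_tuples(a: tuple[int, ...], b: tuple[int, ...]) -> int:
--     max_len = max(len(a), len(b))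
--     pa = tuple(a) + (0,) * (max_len - len(a))
--     pb = tuple(b) + (0,) * (max_len - len(b))
--     return (pa > pb) - (pa < pb)
-- ===== Notes on version B (the rewrite author's own statement) =====
-- stated objective: idiomatic
-- what changed: Replaces the explicit index loop with early-return branches by padding both tuples with zeros to a common length and using Python's built-in lexicographic tuple comparison, (pa > pb) - (pa < pb).
import Mathlib
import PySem

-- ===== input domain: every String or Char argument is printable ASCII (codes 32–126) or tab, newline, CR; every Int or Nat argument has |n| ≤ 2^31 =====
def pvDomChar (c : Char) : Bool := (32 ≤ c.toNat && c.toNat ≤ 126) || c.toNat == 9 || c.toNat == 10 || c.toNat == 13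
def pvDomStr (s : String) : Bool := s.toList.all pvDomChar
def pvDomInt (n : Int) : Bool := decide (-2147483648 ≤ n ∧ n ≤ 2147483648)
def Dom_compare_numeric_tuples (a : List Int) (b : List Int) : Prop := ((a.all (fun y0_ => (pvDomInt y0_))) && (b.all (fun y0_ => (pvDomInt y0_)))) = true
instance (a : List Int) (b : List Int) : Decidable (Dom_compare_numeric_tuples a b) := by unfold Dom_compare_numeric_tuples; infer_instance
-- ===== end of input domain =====

-- B replaces A's explicit index loop by zero-padding both tuples to a common
-- length and using lexicographic tuple comparison (idiomatic; same cost).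

-- ===== PORT A =====
-- A's `for idx in range(max_len)` loop with early returns, as fuel recursion on
-- the remaining iterations (fuel = max_len - idx).
def cntLoopA (a : List Int) (b : List Int) : Nat → Nat → Int
  | _, 0 => 0
  | idx, fuel+1 =>
    let av : Int := if idx < a.length then a.getD idx 0 else 0
    let bv : Int := if idx < b.length then b.getD idx 0 else 0
    if av > bv then 1
    else if av < bv then -1
    else cntLoopA a b (idx+1) fuel

def compare_numeric_tuples (a : List Int) (b : List Int) : Int :=
  cntLoopA a b 0 (max a.length b.length)

-- ===== PORT B =====
-- Python's built-in lexicographic tuple comparison, as `(pa > pb) - (pa < pb)`.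
def pvLexCmp : List Int → List Int → Int
  | x::xs, y::ys => if x > y then 1 else if x < y then -1 else pvLexCmp xs ys
  | [], _::_ => -1
  | _::_, [] => 1
  | [], [] => 0

def compare_numeric_tuples_alt (a : List Int) (b : List Int) : Int :=
  let maxLen := max a.length b.length
  let pa := a ++ List.replicate (maxLen - a.length) 0
  let pb := b ++ List.replicate (maxLen - b.length) 0
  pvLexCmp pa pb

-- ===== PRECONDITION & SPEC =====
def Spec_compare_numeric_tuples (a : List Int) (b : List Int) (out : Int) : Prop := out = compare_numeric_tuples_alt a b
instance (a : List Int) (b : List Int) (out : Int) : Decidable (Spec_compare_numeric_tuples a b out) := by unfold Spec_compare_numeric_tuples; infer_instance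

-- ===== CLAIM (what is proved, stated in full; the proofs are below) =====
def Claim_equal_compare_numeric_tuples : Prop := ∀ (a : List Int) (b : List Int), Dom_compare_numeric_tuples a b → Spec_compare_numeric_tuples a b (compare_numeric_tuples a b)

-- ===== LEMMAS AND PROOFS =====

-- the padded value at index idx equals A's conditional lookup
lemma pad_getD (a : List Int) (k idx : Nat) :
    (a ++ List.replicate k 0).getD idx 0
      = if idx < a.length then a.getD idx 0 else 0 := by
  by_cases h : idx < a.length
  · simp [h, List.getD, List.getElem?_append_left h]
  · simp only [h, if_false, List.getD, List.getElem?_append_right (Nat.le_of_not_lt h)]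
    rcases Nat.lt_or_ge (idx - a.length) k with hk | hk
    · simp [hk]
    · simp [Nat.not_lt.mpr hk]

-- dropping at an in-range index exposes head = getD
lemma drop_cons_getD (l : List Int) (idx : Nat) (h : idx < l.length) :
    l.drop idx = l.getD idx 0 :: l.drop (idx+1) := by
  rw [List.drop_eq_getElem_cons h]
  simp [List.getD, List.getElem?_eq_getElem h]

-- the loop, started at idx with the right fuel, computes pvLexCmp on the tails
lemma cntLoopA_eq_lexCmp (a b : List Int) :
    ∀ (fuel idx : Nat), idx + fuel = max a.length b.length →
    cntLoopA a b idx fuel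
      = pvLexCmp ((a ++ List.replicate (max a.length b.length - a.length) 0).drop idx)
                 ((b ++ List.replicate (max a.length b.length - b.length) 0).drop idx) := by
  intro fuel
  induction fuel with
  | zero =>
    intro idx h
    have ha : (a ++ List.replicate (max a.length b.length - a.length) 0).length = idx := by
      simp; omega
    have hb : (b ++ List.replicate (max a.length b.length - b.length) 0).length = idx := by
      simp; omega
    rw [List.drop_of_length_le (le_of_eq ha), List.drop_of_length_le (le_of_eq hb)]
    rfl
  | succ n ih =>
    intro idx h
    have hia : idx < (a ++ List.replicate (max a.length b.length - a.length) 0).length := by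
      simp; omega
    have hib : idx < (b ++ List.replicate (max a.length b.length - b.length) 0).length := by
      simp; omega
    rw [drop_cons_getD _ _ hia, drop_cons_getD _ _ hib]
    rw [pad_getD, pad_getD]
    show (if _ > _ then (1:Int) else if _ < _ then -1 else cntLoopA a b (idx+1) n) = _
    rw [ih (idx+1) (by omega)]
    simp [pvLexCmp]

-- ===== VERDICT (by name: the statement is the Claim_ definition above) =====
theorem compare_numeric_tuples_spec : Claim_equal_compare_numeric_tuples := by
  intro a b _
  show compare_numeric_tuples a b = compare_numeric_tuples_alt a b
  unfold compare_numeric_tuples compare_numeric_tuples_alt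
  simpa using cntLoopA_eq_lexCmp a b (max a.length b.length) 0 (by omega)
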